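-- pv_equiv track=rewrite | github.com/brianmeyer/molly | approval_legacy.py | _split_compound_commands
-- ===== SOURCE A (Python) =====
-- def _split_compound_commands(raw: str) -> list[str] | None:
--     """Split on top-level shell command operators (&&, ||, ;, |)."""
--     segments: list[str] = []
--     buf: list[str] = []
--     quote: str | None = None
--     i = 0
--
--     while i < len(raw):
--         ch = raw[i]
--         nxt = raw[i : i + 2]
--
--         if quote:
--             buf.append(ch)
--             if ch == quote:
--                 quote = None
--             elif ch == "\\" and i + 1 < len(raw):
--                 i += 1
--                 buf.append(raw[i])
--             i += 1
--             continue
--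
--         if ch in {"'", '"'}:
--             quote = ch
--             buf.append(ch)
--             i += 1
--             continue
--
--         if ch == "\\" and i + 1 < len(raw):
--             buf.append(ch)
--             i += 1
--             buf.append(raw[i])
--             i += 1
--             continue
--
--         if nxt in {"&&", "||"}:
--             segment = "".join(buf).strip()
--             if segment:
--                 segments.append(segment)
--             buf = []
--             i += 2
--             continue
--
--         if ch in {";", "|"}:
--             segment = "".join(buf).strip()
--             if segment:
--                 segments.append(segment)
--             buf = []
--             i += 1
--             continue
--
--         buf.append(ch)
--         i += 1
--
--     if quote is not None:
--         return None
--
--     tail = "".join(buf).strip()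
--     if tail:
--         segments.append(tail)
--     return segments
-- ===== SOURCE B (Python) =====
-- def _split_compound_commands(raw: str) -> list[str] | None:
--     """Split on top-level shell command operators (&&, ||, ;, |)."""
--     n = len(raw)
--     cuts = []  # (operator start, operator end) for each top-level operator
--     quote = None
--     i = 0
--     while i < n:
--         ch = raw[i]
--         if quote:
--             if ch == quote:
--                 quote = None
--                 i += 1
--             elif ch == "\\" and i + 1 < n:
--                 i += 2
--             else:
--                 i += 1
--         elif ch in ("'", '"'):
--             quote = ch
--             i += 1
--         elif ch == "\\" and i + 1 < n:
--             i += 2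
--         elif raw[i:i + 2] in ("&&", "||"):
--             cuts.append((i, i + 2))
--             i += 2
--         elif ch in (";", "|"):
--             cuts.append((i, i + 1))
--             i += 1
--         else:
--             i += 1
--     if quote is not None:
--         return None
--     starts = [0] + [b for _, b in cuts]
--     ends = [a for a, _ in cuts] + [n]
--     return [s for s in (raw[st:en].strip() for st, en in zip(starts, ends)) if s]
-- ===== Notes on version B (the rewrite author's own statement) =====
-- stated objective: alternative
-- what changed: B separates cut-finding from segment materialization: one quote/escape-aware scan records only the (start, end) positions of top-level operators, then a second pass slices the raw string between consecutive cut points, strips each slice and drops empties, instead of A's inline character-buffer flushing.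
import Mathlib
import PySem

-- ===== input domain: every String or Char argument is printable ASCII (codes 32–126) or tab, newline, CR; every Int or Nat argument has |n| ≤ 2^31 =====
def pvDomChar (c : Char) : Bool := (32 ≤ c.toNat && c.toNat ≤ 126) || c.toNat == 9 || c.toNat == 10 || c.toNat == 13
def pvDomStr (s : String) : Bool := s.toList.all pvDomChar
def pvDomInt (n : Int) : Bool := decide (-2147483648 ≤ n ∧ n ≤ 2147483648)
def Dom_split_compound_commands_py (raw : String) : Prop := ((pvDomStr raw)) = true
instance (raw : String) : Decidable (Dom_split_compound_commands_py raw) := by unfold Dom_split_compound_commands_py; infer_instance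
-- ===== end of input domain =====

-- B finds top-level operator cut positions in one scan and materializes segments by slicing in a second pass, instead of flushing an inline buffer (objective: alternative).


-- ===== PORT A =====
-- flush: '"".join(buf).strip(); if segment: segments.append(segment)'
def pvFlushA (segs : List String) (buf : List Char) : List String :=
  let segment := PySem.Chars.strip buf
  if segment = [] then segs else segs ++ [String.ofList segment]

-- A's while-loop over i: recursion over the remaining suffix of raw (1 or 2 chars consumed per step,
-- exactly as A advances i); buf collects the same characters, branches in A's order.
def pvGoA : List Char → List String → List Char → Option Char → Option (List String)
  | [], segs, buf, quote =>
      match quote with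
      | some _ => none
      | none => some (pvFlushA segs buf)
  | ch :: rest, segs, buf, quote =>
      match quote with
      | some q =>
          if ch = q then pvGoA rest segs (buf ++ [ch]) none
          else if ch = '\\' ∧ rest ≠ [] then
            match rest with
            | c2 :: rest2 => pvGoA rest2 segs (buf ++ ['\\', c2]) (some q)
            | [] => none  -- unreachable: rest ≠ []
          else pvGoA rest segs (buf ++ [ch]) (some q)
      | none =>
          if ch = '\'' ∨ ch = '"' then pvGoA rest segs (buf ++ [ch]) (some ch)
          else if ch = '\\' ∧ rest ≠ [] then
            match rest with
            | c2 :: rest2 => pvGoA rest2 segs (buf ++ ['\\', c2]) none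
            | [] => none  -- unreachable: rest ≠ []
          else if (ch = '&' ∧ rest.head? = some '&') ∨ (ch = '|' ∧ rest.head? = some '|') then
            pvGoA rest.tail (pvFlushA segs buf) [] none
          else if ch = ';' ∨ ch = '|' then
            pvGoA rest (pvFlushA segs buf) [] none
          else pvGoA rest segs (buf ++ [ch]) none
  termination_by cs => cs.length
  decreasing_by all_goals simp [List.length_tail]

def split_compound_commands_py (raw : String) : Option (List String) :=
  pvGoA raw.toList [] [] none

-- ===== PORT B =====
-- B's scan: same quote/escape automaton, but it only records (start, end) of each top-level operator.
def pvScanB : List Char → Option Char → Nat → Option (List (Nat × Nat))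
  | [], quote, _ =>
      match quote with
      | some _ => none
      | none => some []
  | ch :: rest, quote, i =>
      match quote with
      | some q =>
          if ch = q then pvScanB rest none (i + 1)
          else if ch = '\\' ∧ rest ≠ [] then pvScanB rest.tail (some q) (i + 2)
          else pvScanB rest (some q) (i + 1)
      | none =>
          if ch = '\'' ∨ ch = '"' then pvScanB rest (some ch) (i + 1)
          else if ch = '\\' ∧ rest ≠ [] then pvScanB rest.tail none (i + 2)
          else if (ch = '&' ∧ rest.head? = some '&') ∨ (ch = '|' ∧ rest.head? = some '|') then
            (pvScanB rest.tail none (i + 2)).map (fun cuts => (i, i + 2) :: cuts)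
          else if ch = ';' ∨ ch = '|' then
            (pvScanB rest none (i + 1)).map (fun cuts => (i, i + 1) :: cuts)
          else pvScanB rest none (i + 1)
  termination_by cs => cs.length
  decreasing_by all_goals simp [List.length_tail]

-- second pass: slice raw between consecutive cut points, strip, drop empties
def split_compound_commands_py_alt (raw : String) : Option (List String) :=
  let L := raw.toList
  let n := L.length
  match pvScanB L none 0 with
  | none => none
  | some cuts =>
      let starts := 0 :: cuts.map (·.2)
      let ends := cuts.map (·.1) ++ [n]
      some (((((starts.zip ends).map
          (fun p => PySem.Chars.strip (PySem.List.slice L (some (p.1 : Int)) (some (p.2 : Int))))).filter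
          (· ≠ [])).map String.ofList))

-- ===== PRECONDITION & SPEC =====
def Spec_split_compound_commands_py (raw : String) (out : Option (List String)) : Prop := out = split_compound_commands_py_alt raw
instance (raw : String) (out : Option (List String)) : Decidable (Spec_split_compound_commands_py raw out) := by unfold Spec_split_compound_commands_py; infer_instance

-- ===== CLAIM (what is proved, stated in full; the proofs are below) =====
def Claim_equal_split_compound_commands_py : Prop := ∀ (raw : String), Dom_split_compound_commands_py raw → Spec_split_compound_commands_py raw (split_compound_commands_py raw)



-- ===== LEMMAS AND PROOFS =====

-- materialize: strip every raw piece, drop the empty ones, make strings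
def pvEmit (l : List (List Char)) : List String :=
  ((l.map PySem.Chars.strip).filter (· ≠ [])).map String.ofList

-- common intermediate: the raw (unstripped) pieces of the split, as
-- (continuation of the current piece, remaining pieces); none = unclosed quote
def pvGoC : List Char → Option Char → Option (List Char × List (List Char))
  | [], quote =>
      match quote with
      | some _ => none
      | none => some ([], [])
  | ch :: rest, quote =>
      match quote with
      | some q =>
          if ch = q then (pvGoC rest none).map (fun pps => (ch :: pps.1, pps.2))
          else if ch = '\\' ∧ rest ≠ [] then
            match rest with
            | c2 :: rest2 => (pvGoC rest2 (some q)).map (fun pps => ('\\' :: c2 :: pps.1, pps.2))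
            | [] => none
          else (pvGoC rest (some q)).map (fun pps => (ch :: pps.1, pps.2))
      | none =>
          if ch = '\'' ∨ ch = '"' then (pvGoC rest (some ch)).map (fun pps => (ch :: pps.1, pps.2))
          else if ch = '\\' ∧ rest ≠ [] then
            match rest with
            | c2 :: rest2 => (pvGoC rest2 none).map (fun pps => ('\\' :: c2 :: pps.1, pps.2))
            | [] => none
          else if (ch = '&' ∧ rest.head? = some '&') ∨ (ch = '|' ∧ rest.head? = some '|') then
            (pvGoC rest.tail none).map (fun pps => ([], pps.1 :: pps.2))
          else if ch = ';' ∨ ch = '|' then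
            (pvGoC rest none).map (fun pps => ([], pps.1 :: pps.2))
          else (pvGoC rest none).map (fun pps => (ch :: pps.1, pps.2))
  termination_by cs => cs.length
  decreasing_by all_goals simp [List.length_tail]

-- the raw pieces determined by the cut list, starting at position i
def pvPiecesR (L : List Char) (i : Nat) : List (Nat × Nat) → List (List Char)
  | [] => [(L.drop i).take (L.length - i)]
  | (a, b) :: cuts => ((L.drop i).take (a - i)) :: pvPiecesR L b cuts

-- end of the first piece: start of the first cut, or the end of the string
def pvFE (n : Nat) : List (Nat × Nat) → Nat
  | [] => n
  | (a, _) :: _ => a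

lemma pvFlush_emit (segs : List String) (b : List Char) (l : List (List Char)) :
    segs ++ pvEmit (b :: l) = pvFlushA segs b ++ pvEmit l := by
  simp only [pvEmit, pvFlushA, List.map_cons, List.filter_cons]
  by_cases h : PySem.Chars.strip b = [] <;> simp [h]

lemma pvGoA_goC (m : Nat) : ∀ (cs : List Char), cs.length = m → ∀ segs buf q,
    pvGoA cs segs buf q =
      (pvGoC cs q).map (fun pps => segs ++ pvEmit ((buf ++ pps.1) :: pps.2)) := by
  induction m using Nat.strong_induction_on with
  | _ m IH =>
    intro cs hm segs buf q
    match cs with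
    | [] =>
      cases q with
      | some qc => simp [pvGoA, pvGoC]
      | none =>
        rw [pvGoA.eq_def, pvGoC.eq_def]
        simpa [pvEmit] using (pvFlush_emit segs buf []).symm
    | ch :: rest =>
      have hr : rest.length < m := by simp at hm; omega
      cases q with
      | some qc =>
        by_cases h1 : ch = qc
        · have hA : pvGoA (ch :: rest) segs buf (some qc)
              = pvGoA rest segs (buf ++ [ch]) none := by
            rw [pvGoA.eq_def]; simp [h1]
          have hC : pvGoC (ch :: rest) (some qc)
              = (pvGoC rest none).map (fun pps => (ch :: pps.1, pps.2)) := by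
            rw [pvGoC.eq_def]; simp [h1]
          rw [hA, hC, IH rest.length hr rest rfl]
          cases h : pvGoC rest none <;> simp
        · by_cases h2 : ch = '\\' ∧ rest ≠ []
          · obtain ⟨h2a, h2b⟩ := h2
            subst h2a
            obtain ⟨c2, rest2, rfl⟩ : ∃ c2 rest2, rest = c2 :: rest2 := by
              cases rest with
              | nil => exact absurd rfl h2b
              | cons a l => exact ⟨a, l, rfl⟩
            have hr2 : rest2.length < m := by simp at hm; omega
            have hA : pvGoA ('\\' :: c2 :: rest2) segs buf (some qc)
                = pvGoA rest2 segs (buf ++ ['\\', c2]) (some qc) := by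
              rw [pvGoA.eq_def]; simp [h1]
            have hC : pvGoC ('\\' :: c2 :: rest2) (some qc)
                = (pvGoC rest2 (some qc)).map (fun pps => ('\\' :: c2 :: pps.1, pps.2)) := by
              rw [pvGoC.eq_def]; simp [h1]
            rw [hA, hC, IH rest2.length hr2 rest2 rfl]
            cases h : pvGoC rest2 (some qc) <;> simp
          · have hA : pvGoA (ch :: rest) segs buf (some qc)
                = pvGoA rest segs (buf ++ [ch]) (some qc) := by
              rw [pvGoA.eq_def]; simp [h1, h2]
            have hC : pvGoC (ch :: rest) (some qc)
                = (pvGoC rest (some qc)).map (fun pps => (ch :: pps.1, pps.2)) := by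
              rw [pvGoC.eq_def]; simp [h1, h2]
            rw [hA, hC, IH rest.length hr rest rfl]
            cases h : pvGoC rest (some qc) <;> simp
      | none =>
        by_cases h1 : ch = '\'' ∨ ch = '"'
        · have hA : pvGoA (ch :: rest) segs buf none
              = pvGoA rest segs (buf ++ [ch]) (some ch) := by
            rw [pvGoA.eq_def]; simp [h1]
          have hC : pvGoC (ch :: rest) none
              = (pvGoC rest (some ch)).map (fun pps => (ch :: pps.1, pps.2)) := by
            rw [pvGoC.eq_def]; simp [h1]
          rw [hA, hC, IH rest.length hr rest rfl]
          cases h : pvGoC rest (some ch) <;> simp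
        · by_cases h2 : ch = '\\' ∧ rest ≠ []
          · obtain ⟨h2a, h2b⟩ := h2
            subst h2a
            obtain ⟨c2, rest2, rfl⟩ : ∃ c2 rest2, rest = c2 :: rest2 := by
              cases rest with
              | nil => exact absurd rfl h2b
              | cons a l => exact ⟨a, l, rfl⟩
            have hr2 : rest2.length < m := by simp at hm; omega
            have hA : pvGoA ('\\' :: c2 :: rest2) segs buf none
                = pvGoA rest2 segs (buf ++ ['\\', c2]) none := by
              rw [pvGoA.eq_def]; simp
            have hC : pvGoC ('\\' :: c2 :: rest2) none
                = (pvGoC rest2 none).map (fun pps => ('\\' :: c2 :: pps.1, pps.2)) := by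
              rw [pvGoC.eq_def]; simp
            rw [hA, hC, IH rest2.length hr2 rest2 rfl]
            cases h : pvGoC rest2 none <;> simp
          · by_cases h3 : (ch = '&' ∧ rest.head? = some '&') ∨ (ch = '|' ∧ rest.head? = some '|')
            · have hrt : rest.tail.length < m := by
                simp [List.length_tail]; omega
              have hA : pvGoA (ch :: rest) segs buf none
                  = pvGoA rest.tail (pvFlushA segs buf) [] none := by
                rw [pvGoA.eq_def]; simp [h1, h2, h3]
              have hC : pvGoC (ch :: rest) none
                  = (pvGoC rest.tail none).map (fun pps => (([] : List Char), pps.1 :: pps.2)) := by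
                rw [pvGoC.eq_def]; simp [h1, h2, h3]
              rw [hA, hC, IH rest.tail.length hrt rest.tail rfl]
              cases h : pvGoC rest.tail none with
              | none => simp
              | some pps => simp [pvFlush_emit]
            · by_cases h4 : ch = ';' ∨ ch = '|'
              · have hA : pvGoA (ch :: rest) segs buf none
                    = pvGoA rest (pvFlushA segs buf) [] none := by
                  rw [pvGoA.eq_def]; simp [h1, h2, h3, h4]
                have hC : pvGoC (ch :: rest) none
                    = (pvGoC rest none).map (fun pps => (([] : List Char), pps.1 :: pps.2)) := by
                  rw [pvGoC.eq_def]; simp [h1, h2, h3, h4]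
                rw [hA, hC, IH rest.length hr rest rfl]
                cases h : pvGoC rest none with
                | none => simp
                | some pps => simp [pvFlush_emit]
              · have hA : pvGoA (ch :: rest) segs buf none
                    = pvGoA rest segs (buf ++ [ch]) none := by
                  rw [pvGoA.eq_def]; simp [h1, h2, h3, h4]
                have hC : pvGoC (ch :: rest) none
                    = (pvGoC rest none).map (fun pps => (ch :: pps.1, pps.2)) := by
                  rw [pvGoC.eq_def]; simp [h1, h2, h3, h4]
                rw [hA, hC, IH rest.length hr rest rfl]
                cases h : pvGoC rest none <;> simp

lemma pvDrop_succ_of_cons {L rest : List Char} {ch : Char} {i : Nat}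
    (h : L.drop i = ch :: rest) : L.drop (i + 1) = rest := by
  rw [← List.tail_drop, h, List.tail_cons]

-- one consumed character extends only the head piece
lemma pvPiecesR_step1 (L : List Char) (i : Nat) (ch : Char) (rest : List Char)
    (cuts : List (Nat × Nat)) (hdrop : L.drop i = ch :: rest)
    (hFE : i + 1 ≤ pvFE L.length cuts) :
    pvPiecesR L i cuts = (pvPiecesR L (i + 1) cuts).modifyHead (fun p => ch :: p) := by
  have hd1 : L.drop (i + 1) = rest := pvDrop_succ_of_cons hdrop
  have hkey : ∀ e, i + 1 ≤ e →
      (L.drop i).take (e - i) = ch :: (L.drop (i + 1)).take (e - (i + 1)) := by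
    intro e he
    rw [hdrop, hd1]
    have : e - i = (e - (i + 1)) + 1 := by omega
    rw [this, List.take_succ_cons]
  cases cuts with
  | nil =>
      have hlen : i + 1 ≤ L.length := by simpa [pvFE] using hFE
      simp only [pvPiecesR, List.modifyHead]
      rw [hkey L.length hlen]
  | cons c cuts' =>
      obtain ⟨a, b⟩ := c
      have ha : i + 1 ≤ a := by simpa [pvFE] using hFE
      simp only [pvPiecesR, List.modifyHead]
      rw [hkey a ha]

lemma pvScanB_goC (L : List Char) (m : Nat) : ∀ (cs : List Char), cs.length = m →
    ∀ (q : Option Char) (i : Nat), L.drop i = cs → i + cs.length = L.length →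
    ((pvScanB cs q i).map (fun cuts => pvPiecesR L i cuts)
        = (pvGoC cs q).map (fun pps => pps.1 :: pps.2))
    ∧ (∀ cuts, pvScanB cs q i = some cuts → i ≤ pvFE L.length cuts) := by
  induction m using Nat.strong_induction_on with
  | _ m IH =>
    intro cs hm q i hdrop hlen
    match cs with
    | [] =>
      cases q with
      | some qc => simp [pvScanB, pvGoC]
      | none =>
        constructor
        · rw [pvScanB.eq_def, pvGoC.eq_def]
          have : i = L.length := by simpa using hlen
          simp [pvPiecesR, this]
        · intro cuts h
          rw [pvScanB.eq_def] at h
          simp at h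
          subst h
          have : i = L.length := by simpa using hlen
          simp [pvFE, this]
    | ch :: rest =>
      have hr : rest.length < m := by simp at hm; omega
      have hd1 : L.drop (i + 1) = rest := pvDrop_succ_of_cons hdrop
      have hlen1 : (i + 1) + rest.length = L.length := by simp at hlen; omega
      -- generic 1-consumed-char step, shared by several branches
      have step1 : ∀ q', (pvScanB (ch :: rest) q i = pvScanB rest q' (i + 1)) →
          (pvGoC (ch :: rest) q = (pvGoC rest q').map (fun pps => (ch :: pps.1, pps.2))) →
          ((pvScanB (ch :: rest) q i).map (fun cuts => pvPiecesR L i cuts)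
              = (pvGoC (ch :: rest) q).map (fun pps => pps.1 :: pps.2))
          ∧ (∀ cuts, pvScanB (ch :: rest) q i = some cuts → i ≤ pvFE L.length cuts) := by
        intro q' hs hc
        obtain ⟨ih1, ih2⟩ := IH rest.length hr rest rfl q' (i + 1) hd1 hlen1
        rw [hs, hc]
        cases hscan : pvScanB rest q' (i + 1) with
        | none =>
            rw [hscan] at ih1
            cases hgoc : pvGoC rest q' <;> rw [hgoc] at ih1 <;> simp_all
        | some cuts =>
            rw [hscan] at ih1
            cases hgoc : pvGoC rest q' with
            | none => rw [hgoc] at ih1; simp_all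
            | some pps =>
                rw [hgoc] at ih1
                simp only [Option.map_some, Option.some.injEq] at ih1 ⊢
                have hfe : i + 1 ≤ pvFE L.length cuts := ih2 cuts hscan
                constructor
                · rw [pvPiecesR_step1 L i ch rest cuts hdrop hfe, ih1]
                  simp
                · intro cuts' h'
                  cases h'
                  omega
      -- generic 2-consumed-chars step (escape), shared by several branches
      have step2 : ∀ q' c2 rest2, rest = c2 :: rest2 →
          (pvScanB (ch :: rest) q i = pvScanB rest2 q' (i + 2)) →
          (pvGoC (ch :: rest) q = (pvGoC rest2 q').map (fun pps => (ch :: c2 :: pps.1, pps.2))) →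
          ((pvScanB (ch :: rest) q i).map (fun cuts => pvPiecesR L i cuts)
              = (pvGoC (ch :: rest) q).map (fun pps => pps.1 :: pps.2))
          ∧ (∀ cuts, pvScanB (ch :: rest) q i = some cuts → i ≤ pvFE L.length cuts) := by
        intro q' c2 rest2 hrest hs hc
        subst hrest
        have hd2 : L.drop (i + 2) = rest2 := by
          have h' := pvDrop_succ_of_cons hd1
          simpa using h'
        have hlen2 : (i + 2) + rest2.length = L.length := by simp at hlen; omega
        have hr2 : rest2.length < m := by simp at hm; omega
        obtain ⟨ih1, ih2⟩ := IH rest2.length hr2 rest2 rfl q' (i + 2) hd2 hlen2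
        rw [hs, hc]
        cases hscan : pvScanB rest2 q' (i + 2) with
        | none =>
            rw [hscan] at ih1
            cases hgoc : pvGoC rest2 q' <;> rw [hgoc] at ih1 <;> simp_all
        | some cuts =>
            rw [hscan] at ih1
            cases hgoc : pvGoC rest2 q' with
            | none => rw [hgoc] at ih1; simp_all
            | some pps =>
                rw [hgoc] at ih1
                simp only [Option.map_some, Option.some.injEq] at ih1 ⊢
                have hfe2 : i + 2 ≤ pvFE L.length cuts := ih2 cuts hscan
                constructor
                · rw [pvPiecesR_step1 L i ch (c2 :: rest2) cuts hdrop (by omega),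
                      pvPiecesR_step1 L (i + 1) c2 rest2 cuts hd1 hfe2, ih1]
                  simp
                · intro cuts' h'
                  cases h'
                  omega
      cases q with
      | some qc =>
        by_cases h1 : ch = qc
        · exact step1 none (by rw [pvScanB.eq_def]; simp [h1]) (by rw [pvGoC.eq_def]; simp [h1])
        · by_cases h2 : ch = '\\' ∧ rest ≠ []
          · obtain ⟨h2a, h2b⟩ := h2
            subst h2a
            obtain ⟨c2, rest2, rfl⟩ : ∃ c2 rest2, rest = c2 :: rest2 := by
              cases rest with
              | nil => exact absurd rfl h2b
              | cons a l => exact ⟨a, l, rfl⟩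
            exact step2 (some qc) c2 rest2 rfl
              (by rw [pvScanB.eq_def]; simp [h1]) (by rw [pvGoC.eq_def]; simp [h1])
          · exact step1 (some qc) (by rw [pvScanB.eq_def]; simp [h1, h2])
              (by rw [pvGoC.eq_def]; simp [h1, h2])
      | none =>
        by_cases h1 : ch = '\'' ∨ ch = '"'
        · exact step1 (some ch) (by rw [pvScanB.eq_def]; simp [h1]) (by rw [pvGoC.eq_def]; simp [h1])
        · by_cases h2 : ch = '\\' ∧ rest ≠ []
          · obtain ⟨h2a, h2b⟩ := h2
            subst h2a
            obtain ⟨c2, rest2, rfl⟩ : ∃ c2 rest2, rest = c2 :: rest2 := by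
              cases rest with
              | nil => exact absurd rfl h2b
              | cons a l => exact ⟨a, l, rfl⟩
            exact step2 none c2 rest2 rfl
              (by rw [pvScanB.eq_def]; simp) (by rw [pvGoC.eq_def]; simp)
          · by_cases h3 : (ch = '&' ∧ rest.head? = some '&') ∨ (ch = '|' ∧ rest.head? = some '|')
            · -- two-character operator: emit cut (i, i+2)
              obtain ⟨c2, rest2, rfl⟩ : ∃ c2 rest2, rest = c2 :: rest2 := by
                rcases h3 with ⟨-, h⟩ | ⟨-, h⟩ <;>
                  (cases rest with
                   | nil => simp at h
                   | cons a l => exact ⟨a, l, rfl⟩)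
              have hd2 : L.drop (i + 2) = rest2 := by
                have h' := pvDrop_succ_of_cons hd1
                simpa using h'
              have hlen2 : (i + 2) + rest2.length = L.length := by simp at hlen; omega
              have hr2 : rest2.length < m := by simp at hm; omega
              obtain ⟨ih1, ih2⟩ := IH rest2.length hr2 rest2 rfl none (i + 2) hd2 hlen2
              have h2' : ¬ ch = '\\' := fun hh => h2 ⟨hh, by simp⟩
              have h3' : ch = '&' ∧ c2 = '&' ∨ ch = '|' ∧ c2 = '|' := by simpa using h3
              have hs : pvScanB (ch :: c2 :: rest2) none i
                  = (pvScanB rest2 none (i + 2)).map (fun cuts => (i, i + 2) :: cuts) := by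
                rw [pvScanB.eq_def]; simp [h1, h2', h3']
              have hc : pvGoC (ch :: c2 :: rest2) none
                  = (pvGoC rest2 none).map (fun pps => (([] : List Char), pps.1 :: pps.2)) := by
                rw [pvGoC.eq_def]; simp [h1, h2', h3']
              rw [hs, hc]
              cases hscan : pvScanB rest2 none (i + 2) with
              | none =>
                  rw [hscan] at ih1
                  cases hgoc : pvGoC rest2 none <;> rw [hgoc] at ih1 <;> simp_all
              | some cuts =>
                  rw [hscan] at ih1
                  cases hgoc : pvGoC rest2 none with
                  | none => rw [hgoc] at ih1; simp_all
                  | some pps =>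
                      rw [hgoc] at ih1
                      simp only [Option.map_some, Option.some.injEq] at ih1 ⊢
                      constructor
                      · simp [pvPiecesR, ih1]
                      · intro cuts' h'
                        cases h'
                        simp [pvFE]
            · by_cases h4 : ch = ';' ∨ ch = '|'
              · -- one-character operator: emit cut (i, i+1)
                obtain ⟨ih1, ih2⟩ := IH rest.length hr rest rfl none (i + 1) hd1 hlen1
                have hs : pvScanB (ch :: rest) none i
                    = (pvScanB rest none (i + 1)).map (fun cuts => (i, i + 1) :: cuts) := by
                  rw [pvScanB.eq_def]; simp [h1, h2, h3, h4]
                have hc : pvGoC (ch :: rest) none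
                    = (pvGoC rest none).map (fun pps => (([] : List Char), pps.1 :: pps.2)) := by
                  rw [pvGoC.eq_def]; simp [h1, h2, h3, h4]
                rw [hs, hc]
                cases hscan : pvScanB rest none (i + 1) with
                | none =>
                    rw [hscan] at ih1
                    cases hgoc : pvGoC rest none <;> rw [hgoc] at ih1 <;> simp_all
                | some cuts =>
                    rw [hscan] at ih1
                    cases hgoc : pvGoC rest none with
                    | none => rw [hgoc] at ih1; simp_all
                    | some pps =>
                        rw [hgoc] at ih1
                        simp only [Option.map_some, Option.some.injEq] at ih1 ⊢
                        constructor
                        · simp [pvPiecesR, ih1]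
                        · intro cuts' h'
                          cases h'
                          simp [pvFE]
              · exact step1 none (by rw [pvScanB.eq_def]; simp [h1, h2, h3, h4])
                  (by rw [pvGoC.eq_def]; simp [h1, h2, h3, h4])

-- B's zip of consecutive cut points yields exactly the recursive piece list
lemma pvZip_piecesR (L : List Char) : ∀ (cuts : List (Nat × Nat)) (i : Nat),
    ((i :: cuts.map (·.2)).zip (cuts.map (·.1) ++ [L.length])).map
        (fun p => (L.drop p.1).take (p.2 - p.1)) = pvPiecesR L i cuts := by
  intro cuts
  induction cuts with
  | nil => intro i; simp [pvPiecesR]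
  | cons c cuts' ih =>
      intro i
      obtain ⟨a, b⟩ := c
      simp [pvPiecesR, ih b]

-- ===== VERDICT (by name: the statement is the Claim_ definition above) =====
theorem split_compound_commands_py_spec : Claim_equal_split_compound_commands_py := by
  intro raw _
  unfold Spec_split_compound_commands_py split_compound_commands_py split_compound_commands_py_alt
  have hA := pvGoA_goC raw.toList.length raw.toList rfl [] [] none
  obtain ⟨hS1, -⟩ := pvScanB_goC raw.toList raw.toList.length raw.toList rfl none 0 (by simp) (by simp)
  rw [hA]
  simp only []
  cases h1 : pvScanB raw.toList none 0 with
  | none =>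
      rw [h1] at hS1
      cases h2 : pvGoC raw.toList none <;> rw [h2] at hS1 <;> simp_all
  | some cuts =>
      rw [h1] at hS1
      cases h2 : pvGoC raw.toList none with
      | none => rw [h2] at hS1; simp_all
      | some pps =>
          rw [h2] at hS1
          simp only [Option.map_some, Option.some.injEq] at hS1
          simp only [Option.map_some, Option.some.injEq]
          rw [show (((0 : Nat) :: cuts.map (·.2)).zip (cuts.map (·.1) ++ [raw.toList.length])).map
                (fun p => PySem.Chars.strip (PySem.List.slice raw.toList (some (p.1 : Int)) (some (p.2 : Int))))
              = (pvPiecesR raw.toList 0 cuts).map PySem.Chars.strip from by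
            rw [← pvZip_piecesR raw.toList cuts 0, List.map_map]
            simp [Function.comp, PySem.List.slice_natCast]]
          rw [hS1]
          simp [pvEmit]
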